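-- pv_equiv track=rewrite | github.com/C-Milne/4th-Year-Dissertation | Solver/solver.py | check_duplicate_values_dictionary
-- ===== SOURCE A (Python) =====
-- def check_duplicate_values_dictionary(d: dict):
--     """https://www.geeksforgeeks.org/python-find-keys-with-duplicate-values-in-dictionary/
--     :returns True if a duplicate is present
--     :returns False if there is no duplicates"""
--     flipped = {}
--     for key, value in d.items():
--         if value not in flipped:
--             flipped[value] = [key]
--         else:
--             return True
--     return False
-- ===== SOURCE B (Python) =====
-- def check_duplicate_values_dictionary(d: dict):
--     """:returns True if a duplicate value is present, False otherwise.
--     Sort the values, then a duplicate exists iff two equal values are adjacent."""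
--     vals = sorted(d.values())
--     return any(x == y for x, y in zip(vals, vals[1:]))
-- ===== Notes on version B (the rewrite author's own statement) =====
-- stated objective: alternative
-- what changed: Replaces A's incremental inverted-dict with early-exit membership by sort-then-adjacent-scan: sort the values (no hash structure at all) and report a duplicate iff some equal pair is adjacent in the sorted order.
import Mathlib
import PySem

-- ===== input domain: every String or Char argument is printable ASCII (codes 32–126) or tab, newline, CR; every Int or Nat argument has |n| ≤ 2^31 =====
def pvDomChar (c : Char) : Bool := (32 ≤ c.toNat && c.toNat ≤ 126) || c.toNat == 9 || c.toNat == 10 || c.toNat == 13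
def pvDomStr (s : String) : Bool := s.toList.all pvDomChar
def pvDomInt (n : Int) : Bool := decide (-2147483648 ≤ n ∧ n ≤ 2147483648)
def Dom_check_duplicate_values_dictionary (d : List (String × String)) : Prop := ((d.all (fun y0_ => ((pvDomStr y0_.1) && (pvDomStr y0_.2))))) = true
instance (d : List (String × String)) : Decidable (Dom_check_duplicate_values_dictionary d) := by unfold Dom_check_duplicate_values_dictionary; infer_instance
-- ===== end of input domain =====

-- B replaces A's incremental inverted-dict (early return on a seen value) by sort-then-adjacent-scan:
-- sort the values and report a duplicate iff two equal values are adjacent in the sorted order.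


-- ===== PORT A =====
-- the 'for key, value in d.items(): …' loop, carrying the 'flipped' dict; early 'return True'
def pvDupLoop (flipped : PySem.Dict String (List String)) : List (String × String) → Bool
  | [] => false
  | (key, value) :: rest =>
      if !(flipped.contains value) then pvDupLoop (flipped.insert value [key]) rest
      else true

def check_duplicate_values_dictionary (d : List (String × String)) : Bool :=
  pvDupLoop PySem.Dict.empty d

-- ===== PORT B =====
-- vals = sorted(d.values()); any(x == y for x, y in zip(vals, vals[1:]))
-- (vals[1:] on a list is exactly List.drop 1)
def check_duplicate_values_dictionary_alt (d : List (String × String)) : Bool :=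
  let vals := PySem.List.sorted (d.map Prod.snd) (fun x => x) false
  (vals.zip (vals.drop 1)).any (fun p => p.1 == p.2)

-- ===== PRECONDITION & SPEC =====
def Spec_check_duplicate_values_dictionary (d : List (String × String)) (out : Bool) : Prop := out = check_duplicate_values_dictionary_alt d
instance (d : List (String × String)) (out : Bool) : Decidable (Spec_check_duplicate_values_dictionary d out) := by unfold Spec_check_duplicate_values_dictionary; infer_instance

-- ===== CLAIM (what is proved, stated in full; the proofs are below) =====
def Claim_equal_check_duplicate_values_dictionary : Prop := ∀ (d : List (String × String)), Dom_check_duplicate_values_dictionary d → Spec_check_duplicate_values_dictionary d (check_duplicate_values_dictionary d)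

-- ===== LEMMAS AND PROOFS =====

-- A's loop, with a dict whose keys are exactly the members of `seen`, answers
-- "is the value sequence not duplicate-free w.r.t. itself and `seen`"
theorem pv_loop_char (rest : List (String × String)) (flipped : PySem.Dict String (List String))
    (seen : List String) (hinv : ∀ v, flipped.contains v = decide (v ∈ seen)) :
    pvDupLoop flipped rest
      = !decide ((rest.map Prod.snd).Nodup ∧ ∀ v ∈ rest.map Prod.snd, v ∉ seen) := by
  induction rest generalizing flipped seen with
  | nil => simp [pvDupLoop]
  | cons p rest ih =>
    obtain ⟨k, v⟩ := p
    by_cases hv : v ∈ seen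
    · have hc : flipped.contains v = true := by simp [hinv, hv]
      have hneg : ¬(((v :: rest.map Prod.snd).Nodup) ∧ ∀ w ∈ v :: rest.map Prod.snd, w ∉ seen) := by
        rintro ⟨-, hall⟩
        exact hall v (List.mem_cons_self ..) hv
      simp only [pvDupLoop, hc, Bool.not_true, Bool.false_eq_true, if_false, List.map_cons]
      symm
      simp only [Bool.not_eq_true', decide_eq_false_iff_not]
      exact hneg
    · have hc : flipped.contains v = false := by simp [hinv, hv]
      have hmem : ∀ w, (flipped.insert v [k]).contains w = decide (w ∈ v :: seen) := by
        intro w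
        by_cases hw : w = v <;> simp [PySem.Dict.contains_insert, hw, hinv]
      simp only [pvDupLoop, hc, Bool.not_false, if_true, List.map_cons]
      rw [ih _ _ hmem]
      congr 1
      rw [decide_eq_decide]
      constructor
      · rintro ⟨hn, hall⟩
        refine ⟨List.nodup_cons.2 ⟨fun hm => hall v hm (List.mem_cons_self ..), hn⟩,
          fun w hws hwseen => ?_⟩
        rcases List.mem_cons.1 hws with h | h
        · subst h; exact hv hwseen
        · exact hall w h (List.mem_cons_of_mem _ hwseen)
      · rintro ⟨hn, hall⟩
        refine ⟨(List.nodup_cons.1 hn).2, fun w hw hws => ?_⟩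
        rcases List.mem_cons.1 hws with h | h
        · exact (List.nodup_cons.1 hn).1 (h ▸ hw)
        · exact hall w (List.mem_cons_of_mem _ hw) h

-- on a ≤-sorted list over a linear order, an adjacent equal pair exists iff the list has a duplicate
theorem pv_adj_dup {α : Type} [LinearOrder α] [DecidableEq α] (l : List α)
    (hs : l.Pairwise (· ≤ ·)) :
    ((l.zip (l.drop 1)).any (fun p => p.1 == p.2)) = !decide l.Nodup := by
  induction l with
  | nil => simp
  | cons a t ih =>
    cases t with
    | nil => simp
    | cons b t =>
      have hab : a ≤ b := (List.pairwise_cons.1 hs).1 b (by simp)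
      have hst : (b :: t).Pairwise (· ≤ ·) := (List.pairwise_cons.1 hs).2
      by_cases he : a = b
      · subst he
        simp [List.nodup_cons]
      · -- a < b ≤ every element of t, hence a ∉ b :: t
        have hnot : a ∉ b :: t := by
          intro hmem
          rcases List.mem_cons.1 hmem with h | h
          · exact he h
          · have hbx : b ≤ a := (List.pairwise_cons.1 hst).1 a h
            exact he (le_antisymm hab hbx)
        have : ((a :: b :: t).zip ((a :: b :: t).drop 1)).any (fun p => p.1 == p.2)
            = ((b :: t).zip ((b :: t).drop 1)).any (fun p => p.1 == p.2) := by
          simp [List.zip, he]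
        rw [this, ih hst]
        congr 1
        simp [List.nodup_cons, hnot]

-- ===== VERDICT (by name: the statement is the Claim_ definition above) =====
theorem check_duplicate_values_dictionary_spec : Claim_equal_check_duplicate_values_dictionary := by
  intro d _
  unfold Spec_check_duplicate_values_dictionary check_duplicate_values_dictionary
    check_duplicate_values_dictionary_alt
  rw [pv_loop_char d PySem.Dict.empty [] (by intro v; simp [PySem.Dict.empty])]
  rw [pv_adj_dup _ (PySem.List.sorted_pairwise (d.map Prod.snd) (fun x => x))]
  have hperm : (PySem.List.sorted (d.map Prod.snd) (fun x => x) false).Perm (d.map Prod.snd) :=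
    PySem.List.sorted_perm _ _ _
  simp [hperm.nodup_iff]
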